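-- pv_equiv track=rewrite | github.com/tinkerer-red/CPP-to-GML-Bridger | parser/header_parser.py | get_enum_prefix_suffix_cleanup
-- ===== SOURCE A (Python) =====
-- def strip_common_prefix(enum_name, entries):
--     parts = [k.split('_') for k in entries if '_' in k]
--     common = []
--     for i in zip(*parts):
--         if all(p == i[0] for p in i):
--             common.append(i[0])
--         else:
--             break
--     return '_'.join(common) + '_' if common else ''
--
-- def get_enum_prefix_suffix_cleanup(enum_keys):
--     keys = list(enum_keys)
--     prefix = strip_common_prefix("", keys)
--     suffix = None
--     suffixes = [k.split('_')[-1] for k in keys if '_' in k]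
--     if len(suffixes) == len(keys) and all(s == suffixes[0] for s in suffixes):
--         sfx = suffixes[0]
--         if sfx.isupper() and len(sfx) >= 2:
--             suffix = f"_{sfx}"
--     return prefix, suffix
-- ===== SOURCE B (Python) =====
-- def get_enum_prefix_suffix_cleanup(enum_keys):
--     keys = list(enum_keys)
--     split_keys = [k.split('_') for k in keys if '_' in k]
--     # prefix: row-wise fold instead of column transpose
--     if not split_keys:
--         prefix = ''
--     else:
--         common = split_keys[0]
--         for p in split_keys[1:]:
--             n = min(len(common), len(p))
--             j = 0
--             while j < n and common[j] == p[j]: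
--                 j += 1
--             common = common[:j]
--         prefix = '_'.join(common) + '_' if common else ''
--     # suffix: reuse split_keys instead of re-splitting
--     suffix = None
--     if split_keys and len(split_keys) == len(keys):
--         last = split_keys[0][-1]
--         if all(p[-1] == last for p in split_keys) and last.isupper() and len(last) >= 2:
--             suffix = '_' + last
--     return prefix, suffix
-- ===== Notes on version B (the rewrite author's own statement) =====
-- stated objective: alternative
-- what changed: Prefix is computed by folding over split keys (shrinking a running common prefix at the first element mismatch) instead of transposing with zip(*parts) and scanning columns, and the keys are split only once and reused for the suffix check.
import Mathlib
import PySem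

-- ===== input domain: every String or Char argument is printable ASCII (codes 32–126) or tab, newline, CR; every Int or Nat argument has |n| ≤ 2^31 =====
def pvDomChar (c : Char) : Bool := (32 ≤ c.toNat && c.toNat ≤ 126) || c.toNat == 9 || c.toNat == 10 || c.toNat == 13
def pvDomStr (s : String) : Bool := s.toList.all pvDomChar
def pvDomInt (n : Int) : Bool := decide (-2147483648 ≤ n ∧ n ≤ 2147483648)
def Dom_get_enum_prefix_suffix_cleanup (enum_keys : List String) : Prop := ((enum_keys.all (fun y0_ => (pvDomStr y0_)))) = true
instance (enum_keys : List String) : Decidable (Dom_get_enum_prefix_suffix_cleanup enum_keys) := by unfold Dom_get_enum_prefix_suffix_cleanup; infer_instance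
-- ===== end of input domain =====

-- B computes the common '_'-prefix by a row-wise fold over the split keys (instead of a
-- zip-transpose column scan) and splits each key only once, reusing the parts for the
-- suffix check; same cost, different decomposition.


-- shared helpers (ports of the Python built-ins both versions call)
-- k.split('_'); sep = "_" ≠ "", so split? is always some — getD never fires
def pySplitUnd (k : String) : List String := (PySem.Str.split? k "_").getD [k]

-- s.isupper(): ASCII — at least one cased (letter) character and no lowercase letter
def pyIsupper (s : String) : Bool :=
  s.toList.any PySem.Chars.isalpha && s.toList.all (fun c => !PySem.Chars.islower c)

-- ===== PORT A =====
-- zip(*parts): columns until the shortest row is exhausted; zip() of no rows is empty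
def zipStar (rows : List (List String)) : List (List String) :=
  if rows.isEmpty then []
  else if rows.any List.isEmpty then []
  else (rows.map (·.headD "")) :: zipStar (rows.map List.tail)
termination_by (rows.headD []).length
decreasing_by
  rename_i h1 h2
  cases rows with
  | nil => simp at h1
  | cons r rs =>
    cases r with
    | nil => simp at h2
    | cons a as => simp

-- the 'for i in zip(*parts)' loop with its break, accumulating 'common'
def loopA : List (List String) → List String → List String
  | [], common => common
  | i :: rest, common =>
      if i.all (fun p => p == i.headD "") then loopA rest (common ++ [i.headD ""])
      else common

def strip_common_prefix (_enum_name : String) (entries : List String) : String :=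
  let parts := (entries.filter (fun k => PySem.Str.isIn "_" k)).map pySplitUnd
  let common := loopA (zipStar parts) []
  if common ≠ [] then PySem.Str.join "_" common ++ "_" else ""

def get_enum_prefix_suffix_cleanup (enum_keys : List String) : String × Option String :=
  let keys := enum_keys
  let prefix' := strip_common_prefix "" keys
  let suffixes := (keys.filter (fun k => PySem.Str.isIn "_" k)).map
    (fun k => ((pySplitUnd k).getLast?).getD "")   -- k.split('_')[-1]; split is never empty
  let suffix :=
    if suffixes.length == keys.length && suffixes.all (fun s => s == suffixes.headD "") then
      -- Python reads suffixes[0] here: IndexError when keys = [] (excluded by Pre_)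
      let sfx := suffixes.headD ""
      if pyIsupper sfx && decide (2 ≤ PySem.Str.len sfx) then some ("_" ++ sfx) else none
    else none
  (prefix', suffix)

-- ===== PORT B =====
-- length of the leading run of equal elements (B's inner while loop)
def matchLen : List String → List String → Nat
  | a :: as, b :: bs => if a == b then matchLen as bs + 1 else 0
  | _, _ => 0

def get_enum_prefix_suffix_cleanup_alt (enum_keys : List String) : String × Option String :=
  let keys := enum_keys
  let split_keys := (keys.filter (fun k => PySem.Str.isIn "_" k)).map pySplitUnd
  let prefix' :=
    match split_keys with
    | [] => ""
    | c0 :: rest =>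
        let common := rest.foldl (fun common p => common.take (matchLen common p)) c0
        if common ≠ [] then PySem.Str.join "_" common ++ "_" else ""
  let suffix :=
    match split_keys with
    | [] => none
    | c0 :: _ =>
        if split_keys.length == keys.length then
          let last := (c0.getLast?).getD ""
          if split_keys.all (fun p => (p.getLast?).getD "" == last)
              && pyIsupper last && decide (2 ≤ PySem.Str.len last)
          then some ("_" ++ last) else none
        else none
  (prefix', suffix)

-- ===== PRECONDITION & SPEC =====
-- Pre_ excludes only the empty list, on which the Python A raises IndexError (suffixes[0]).
def Pre_get_enum_prefix_suffix_cleanup (enum_keys : List String) : Prop := enum_keys ≠ []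
instance (enum_keys : List String) : Decidable (Pre_get_enum_prefix_suffix_cleanup enum_keys) := by unfold Pre_get_enum_prefix_suffix_cleanup; infer_instance
def pvWitness_get_enum_prefix_suffix_cleanup : List String := ["COL_RED_E", "COL_BLUE_E"]

def Spec_get_enum_prefix_suffix_cleanup (enum_keys : List String) (out : String × Option String) : Prop := out = get_enum_prefix_suffix_cleanup_alt enum_keys
instance (enum_keys : List String) (out : String × Option String) : Decidable (Spec_get_enum_prefix_suffix_cleanup enum_keys out) := by unfold Spec_get_enum_prefix_suffix_cleanup; infer_instance

-- ===== CLAIM (what is proved, stated in full; the proofs are below) =====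
def Claim_equal_get_enum_prefix_suffix_cleanup : Prop := ∀ (enum_keys : List String), Dom_get_enum_prefix_suffix_cleanup enum_keys → Pre_get_enum_prefix_suffix_cleanup enum_keys → Spec_get_enum_prefix_suffix_cleanup enum_keys (get_enum_prefix_suffix_cleanup enum_keys)
-- ===== LEMMAS AND PROOFS =====

-- the common value both prefix loops compute: longest run of positions where every row agrees with r0
def lcpAll : List String → List (List String) → List String
  | [], _ => []
  | a :: as, rest =>
      if rest.all (fun r => match r with | b :: _ => b == a | [] => false)
      then a :: lcpAll as (rest.map List.tail)
      else []

theorem loopA_zipStar (r0 : List String) (rest : List (List String)) (acc : List String) :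
    loopA (zipStar (r0 :: rest)) acc = acc ++ lcpAll r0 rest := by
  induction r0 generalizing rest acc with
  | nil => rw [zipStar]; simp [loopA, lcpAll]
  | cons a as ih =>
    rw [zipStar]
    rw [if_neg (by simp)]
    by_cases hemp : rest.any List.isEmpty
    · rw [if_pos (by simp [hemp])]
      simp only [loopA, lcpAll]
      obtain ⟨r, hr, hre⟩ := List.any_eq_true.mp hemp
      rw [List.isEmpty_iff] at hre
      rw [if_neg]
      · simp
      · simp only [List.all_eq_true]
        intro hall
        have := hall r hr
        subst hre
        simp at this
    · rw [if_neg (by simp [hemp])]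
      have hne : ∀ r ∈ rest, r ≠ [] := by
        intro r hr hcon
        exact hemp (List.any_eq_true.mpr ⟨r, hr, by simp [hcon]⟩)
      simp only [List.map_cons, List.headD_cons, loopA, List.all_cons, beq_self_eq_true,
        Bool.true_and, List.tail_cons]
      have heq : (rest.map (fun r => r.headD "")).all (fun p => p == a)
          = rest.all (fun r => match r with | b :: _ => b == a | [] => false) := by
        rw [Bool.eq_iff_iff]
        simp only [List.all_map, List.all_eq_true, Function.comp]
        constructor
        · intro h x hx
          cases hx2 : x with
          | nil => exact absurd hx2 (hne x hx)
          | cons b bs => simpa [hx2] using h x hx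
        · intro h x hx
          have := h x hx
          cases hx2 : x with
          | nil => exact absurd hx2 (hne x hx)
          | cons b bs => simp [hx2] at this ⊢; exact this
      rw [heq]
      simp only [lcpAll]
      by_cases hall : rest.all (fun r => match r with | b :: _ => b == a | [] => false) = true
      · rw [if_pos hall, if_pos hall, ih]
        simp
      · rw [if_neg hall, if_neg hall]
        simp

theorem lcpAll_cons (r0 p : List String) (rest : List (List String)) :
    lcpAll r0 (p :: rest) = lcpAll (r0.take (matchLen r0 p)) rest := by
  induction r0 generalizing p rest with
  | nil => simp [lcpAll, matchLen]
  | cons a as ih =>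
    cases p with
    | nil =>
      have hm : matchLen (a :: as) [] = 0 := rfl
      rw [hm, List.take_zero]
      simp only [lcpAll, List.all_cons]
      rw [if_neg]
      simp
    | cons b bs =>
      by_cases hab : a = b
      · subst hab
        have hm : matchLen (a :: as) (a :: bs) = matchLen as bs + 1 := by simp [matchLen]
        rw [hm, List.take_succ_cons]
        simp only [lcpAll, List.all_cons, beq_self_eq_true, Bool.true_and, List.map_cons,
          List.tail_cons]
        by_cases hall : rest.all (fun r => match r with | c :: _ => c == a | [] => false) = true
        · rw [if_pos hall, if_pos hall, ih]
        · rw [if_neg hall, if_neg hall]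
      · have hab' : (a == b) = false := by simp [hab]
        have hm : matchLen (a :: as) (b :: bs) = 0 := by simp [matchLen, hab']
        rw [hm, List.take_zero]
        simp only [lcpAll, List.all_cons]
        rw [if_neg]
        simp only [Bool.and_eq_true]
        rintro ⟨h1, -⟩
        exact hab ((eq_of_beq h1).symm)

theorem foldl_lcpAll (rest : List (List String)) (r0 : List String) :
    rest.foldl (fun common p => common.take (matchLen common p)) r0 = lcpAll r0 rest := by
  induction rest generalizing r0 with
  | nil =>
    simp only [List.foldl_nil]
    induction r0 with
    | nil => rfl
    | cons a as ih2 =>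
      simp only [lcpAll, List.all_nil, List.map_nil]
      simp [← ih2]
  | cons p rest ih =>
    rw [List.foldl_cons, ih, lcpAll_cons]

-- suffix extraction: both ports take the same last element of the same split
theorem suffixes_eq (keys : List String) :
    (keys.filter (fun k => PySem.Str.isIn "_" k)).map (fun k => ((pySplitUnd k).getLast?).getD "")
    = ((keys.filter (fun k => PySem.Str.isIn "_" k)).map pySplitUnd).map
        (fun p => (p.getLast?).getD "") := by
  simp [List.map_map, Function.comp]

-- ===== VERDICT (by name: the statement is the Claim_ definition above) =====
theorem get_enum_prefix_suffix_cleanup_spec : Claim_equal_get_enum_prefix_suffix_cleanup := by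
  intro keys _hdom hpre
  unfold Spec_get_enum_prefix_suffix_cleanup
  unfold get_enum_prefix_suffix_cleanup get_enum_prefix_suffix_cleanup_alt strip_common_prefix
  simp only []
  set parts := (keys.filter (fun k => PySem.Str.isIn "_" k)).map pySplitUnd with hparts
  have hsfx := suffixes_eq keys
  rw [← hparts] at hsfx
  rw [hsfx]
  refine Prod.ext ?_ ?_
  · -- prefix component
    cases parts with
    | nil => rw [zipStar]; simp [loopA]
    | cons c0 rest =>
      dsimp only
      rw [loopA_zipStar, List.nil_append, foldl_lcpAll]
  · -- suffix component
    cases parts with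
    | nil =>
      dsimp only
      rw [if_neg]
      simp only [List.map_nil, List.length_nil, List.all_nil, Bool.and_true, beq_iff_eq]
      intro h0
      exact hpre (List.eq_nil_of_length_eq_zero h0.symm)
    | cons c0 cs =>
      dsimp only
      simp only [List.map_cons, List.headD_cons, List.length_cons, List.length_map,
        List.all_cons, List.all_map, Function.comp_def, beq_self_eq_true, Bool.true_and]
      by_cases hl : (cs.length + 1 == keys.length) = true
      · rw [hl]
        simp only [Bool.true_and, if_true]
        by_cases hall : cs.all (fun x => (x.getLast?).getD "" == (c0.getLast?).getD "") = true
        · rw [if_pos hall, hall]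
          simp only [Bool.true_and]
          rfl
        · have hf : cs.all (fun x => (x.getLast?).getD "" == (c0.getLast?).getD "") = false :=
            Bool.eq_false_iff.mpr hall
          rw [if_neg hall, hf]
          simp
      · have hlf : (cs.length + 1 == keys.length) = false := Bool.eq_false_iff.mpr hl
        rw [hlf]
        simp
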